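-- pv_equiv track=rewrite | github.com/exec-dkail/Tools | files/max/external/MayaExporter/exporter.py | getForbiddenFaceList
-- ===== SOURCE A (Python) =====
-- def getForbiddenFaceList(linkedFacesList,edgePartitionsList,vertIndex,faceIndex):
-- 	linkedFaces = linkedFacesList[vertIndex]
-- 	edgePartitions = edgePartitionsList[vertIndex]
-- 	forbiddenList=[]
-- 	for index,partition in enumerate(linkedFaces):
-- 		if faceIndex in partition:
-- 			forbiddenList = forbiddenList + [item for i,item in enumerate(linkedFaces) if i != index]
-- 	return [item for sublist in forbiddenList for item in sublist]
-- ===== SOURCE B (Python) =====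
-- def getForbiddenFaceList(linkedFacesList, edgePartitionsList, vertIndex, faceIndex):
--     linkedFaces = linkedFacesList[vertIndex]
--     full = [item for partition in linkedFaces for item in partition]
--     out = []
--     s = 0
--     for partition in linkedFaces:
--         e = s + len(partition)
--         if faceIndex in partition:
--             out += full[:s] + full[e:]
--         s = e
--     return out
-- ===== Notes on version B (the rewrite author's own statement) =====
-- stated objective: alternative
-- what changed: B flattens the partitions once and keeps a running offset, emitting full[:s]+full[e:] per matching partition, instead of A's per-match rebuild of the whole list-of-lists followed by a final flatten.
import Mathlib
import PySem

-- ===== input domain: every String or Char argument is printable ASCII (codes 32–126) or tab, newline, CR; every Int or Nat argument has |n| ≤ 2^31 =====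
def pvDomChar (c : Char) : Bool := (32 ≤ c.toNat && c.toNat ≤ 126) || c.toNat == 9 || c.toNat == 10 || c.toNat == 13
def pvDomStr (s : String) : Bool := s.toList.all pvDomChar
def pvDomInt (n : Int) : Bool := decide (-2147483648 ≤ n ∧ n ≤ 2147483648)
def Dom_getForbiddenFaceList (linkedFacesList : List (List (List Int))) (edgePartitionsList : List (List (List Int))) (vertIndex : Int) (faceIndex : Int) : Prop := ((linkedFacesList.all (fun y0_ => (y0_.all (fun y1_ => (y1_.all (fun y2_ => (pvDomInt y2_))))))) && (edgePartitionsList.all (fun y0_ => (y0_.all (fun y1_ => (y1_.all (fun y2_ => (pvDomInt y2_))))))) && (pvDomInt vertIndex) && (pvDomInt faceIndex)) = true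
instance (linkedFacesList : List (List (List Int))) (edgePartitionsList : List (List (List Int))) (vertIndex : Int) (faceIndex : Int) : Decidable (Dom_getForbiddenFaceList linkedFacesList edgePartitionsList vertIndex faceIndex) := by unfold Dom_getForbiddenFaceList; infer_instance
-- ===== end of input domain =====

-- B replaces A's per-match rebuild of the full list-of-lists by one flattened list plus a running
-- offset, appending two slices of the flat list per matching partition (objective: alternative).

-- ===== PORT A =====
-- literal transliteration of A: index both argument lists, accumulate the other partitions for
-- every partition containing faceIndex, flatten at the end.  The 'none' branches are the inputs on
-- which Python A raises IndexError; they are excluded by Pre_.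
def getForbiddenFaceList (linkedFacesList : List (List (List Int))) (edgePartitionsList : List (List (List Int))) (vertIndex : Int) (faceIndex : Int) : List Int :=
  match PySem.List.pyGet? linkedFacesList vertIndex, PySem.List.pyGet? edgePartitionsList vertIndex with
  | some linkedFaces, some _edgePartitions =>
      let forbiddenList : List (List Int) :=
        (PySem.List.enumerate linkedFaces).foldl
          (fun acc ip =>
            if faceIndex ∈ ip.2 then
              acc ++ ((PySem.List.enumerate linkedFaces).filter (fun jq => jq.1 != ip.1)).map (·.2)
            else acc) []
      forbiddenList.flatten
  | _, _ => []

-- ===== PORT B =====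
-- literal transliteration of Source B: flatten once, then one loop with a running offset s; the two
-- Python slices full[:s] and full[e:] have non-negative bounds, so they are exactly take/drop
-- (PySem.List.slice_to_natCast / slice_from_natCast).
def getForbiddenFaceList_alt (linkedFacesList : List (List (List Int))) (edgePartitionsList : List (List (List Int))) (vertIndex : Int) (faceIndex : Int) : List Int :=
  match PySem.List.pyGet? linkedFacesList vertIndex with
  | some linkedFaces =>
      let full : List Int := linkedFaces.flatMap (fun partition => partition)
      (linkedFaces.foldl
        (fun (st : List Int × Nat) partition =>
          let e := st.2 + partition.length
          (if faceIndex ∈ partition then st.1 ++ (full.take st.2 ++ full.drop e) else st.1, e))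
        ([], 0)).1
  | none => []

-- ===== PRECONDITION & SPEC =====
-- Pre_ excludes exactly the inputs on which Python A raises IndexError: vertIndex must be a valid
-- (possibly negative) Python index into both argument lists.
def Pre_getForbiddenFaceList (linkedFacesList : List (List (List Int))) (edgePartitionsList : List (List (List Int))) (vertIndex : Int) (faceIndex : Int) : Prop :=
  PySem.Raise.InRange linkedFacesList.length vertIndex ∧ PySem.Raise.InRange edgePartitionsList.length vertIndex
instance (linkedFacesList : List (List (List Int))) (edgePartitionsList : List (List (List Int))) (vertIndex : Int) (faceIndex : Int) : Decidable (Pre_getForbiddenFaceList linkedFacesList edgePartitionsList vertIndex faceIndex) := by unfold Pre_getForbiddenFaceList; infer_instance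
def pvWitness_getForbiddenFaceList : List (List (List Int)) × List (List (List Int)) × Int × Int :=
  ([[[1, 2], [3], [2, 4]]], [[[0]]], 0, 2)

def Spec_getForbiddenFaceList (linkedFacesList : List (List (List Int))) (edgePartitionsList : List (List (List Int))) (vertIndex : Int) (faceIndex : Int) (out : List Int) : Prop := out = getForbiddenFaceList_alt linkedFacesList edgePartitionsList vertIndex faceIndex
instance (linkedFacesList : List (List (List Int))) (edgePartitionsList : List (List (List Int))) (vertIndex : Int) (faceIndex : Int) (out : List Int) : Decidable (Spec_getForbiddenFaceList linkedFacesList edgePartitionsList vertIndex faceIndex out) := by unfold Spec_getForbiddenFaceList; infer_instance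

-- ===== CLAIM (what is proved, stated in full; the proofs are below) =====
def Claim_equal_getForbiddenFaceList : Prop := ∀ (linkedFacesList : List (List (List Int))) (edgePartitionsList : List (List (List Int))) (vertIndex : Int) (faceIndex : Int), Dom_getForbiddenFaceList linkedFacesList edgePartitionsList vertIndex faceIndex → Pre_getForbiddenFaceList linkedFacesList edgePartitionsList vertIndex faceIndex → Spec_getForbiddenFaceList linkedFacesList edgePartitionsList vertIndex faceIndex (getForbiddenFaceList linkedFacesList edgePartitionsList vertIndex faceIndex)
-- ===== LEMMAS AND PROOFS =====

-- the common value of both ports: walk the partitions with a running offset into the flat list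
def pvCore (fi : Int) (full : List Int) : Nat → List (List Int) → List Int
  | _, [] => []
  | off, p :: rest =>
      (if fi ∈ p then full.take off ++ full.drop (off + p.length) else []) ++
      pvCore fi full (off + p.length) rest

-- B's loop computes pvCore
theorem pvB_loop (fi : Int) (full : List Int) :
    ∀ (rest : List (List Int)) (acc : List Int) (off : Nat),
    (rest.foldl
      (fun (st : List Int × Nat) partition =>
        let e := st.2 + partition.length
        (if fi ∈ partition then st.1 ++ (full.take st.2 ++ full.drop e) else st.1, e))
      (acc, off)).1 = acc ++ pvCore fi full off rest := by
  intro rest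
  induction rest with
  | nil => intro acc off; simp [pvCore]
  | cons p rest ih =>
      intro acc off
      by_cases h : fi ∈ p <;> simp [pvCore, h, ih, List.append_assoc]

-- every index in enumerate L s is ≥ s, so filtering out an index < s keeps everything
theorem pvEnumFilterAll (L : List (List Int)) :
    ∀ (s t : Int), t < s →
    ((PySem.List.enumerate L s).filter (fun jq => jq.1 != t)).map (·.2) = L := by
  induction L with
  | nil => intro s t _; rfl
  | cons p L ih =>
      intro s t ht
      rw [PySem.List.enumerate_cons]
      have hne : ((s != t) : Bool) = true := by simp [bne_iff_ne]; omega
      simp only [List.filter_cons, hne, if_true, List.map_cons]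
      rw [ih (s + 1) t (by omega)]

-- filtering index ≠ s + k out of enumerate L s and dropping the indices is eraseIdx k
theorem pvEnumFilterNe (L : List (List Int)) :
    ∀ (s : Int) (k : Nat),
    ((PySem.List.enumerate L s).filter (fun jq => jq.1 != s + (k : Int))).map (·.2) = L.eraseIdx k := by
  induction L with
  | nil => intro s k; rfl
  | cons p L ih =>
      intro s k
      rw [PySem.List.enumerate_cons]
      cases k with
      | zero =>
          have hh : ((s != s + ((0 : Nat) : Int)) : Bool) = false := by simp
          simp only [List.filter_cons, hh, Bool.false_eq_true, if_false, List.eraseIdx_cons_zero]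
          simpa using pvEnumFilterAll L (s + 1) s (by omega)
      | succ k =>
          have hh : ((s != s + ((k + 1 : Nat) : Int)) : Bool) = true := by
            simp [bne_iff_ne]; omega
          simp only [List.filter_cons, hh, if_true, List.map_cons, List.eraseIdx_cons_succ]
          have heq : s + ((k + 1 : Nat) : Int) = (s + 1) + (k : Int) := by push_cast; omega
          rw [heq, ih (s + 1) k]

-- flattening L with partition k erased = the flat list with L[k]'s slice cut out
theorem pvEraseFlatten (L : List (List Int)) (k : Nat) (h : k < L.length) :
    (L.eraseIdx k).flatten =
      L.flatten.take ((L.take k).flatten.length) ++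
      L.flatten.drop ((L.take k).flatten.length + L[k].length) := by
  have hL : L = L.take k ++ L[k] :: L.drop (k + 1) := by
    conv_lhs => rw [← List.take_append_drop k L, List.drop_eq_getElem_cons h]
  have hflat : L.flatten = (L.take k).flatten ++ (L[k] :: L.drop (k + 1)).flatten := by
    conv_lhs => rw [hL]
    rw [List.flatten_append]
  rw [List.eraseIdx_eq_take_drop_succ, List.flatten_append]
  congr 1
  · rw [hflat, List.take_left]
  · rw [hflat, List.flatten_cons, ← List.append_assoc]
    exact (List.drop_left' (by simp)).symm

theorem pvFlattenFlatMap (M : List (Int × List Int)) (g : Int × List Int → List (List Int)) :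
    (M.flatMap g).flatten = M.flatMap (fun x => (g x).flatten) := by
  induction M with
  | nil => rfl
  | cons x M ih => simp [List.flatMap_cons, List.flatten_append, ih]

-- A's filtered-enumerate flatMap over a suffix of L equals pvCore at the matching offset
theorem pvA_main (fi : Int) (L : List (List Int)) :
    ∀ (rest : List (List Int)) (j : Nat), rest = L.drop j →
    ((PySem.List.enumerate rest (j : Int)).filter (fun ip => decide (fi ∈ ip.2))).flatMap
        (fun ip =>
          (((PySem.List.enumerate L 0).filter (fun jq => jq.1 != ip.1)).map (·.2)).flatten)
      = pvCore fi L.flatten ((L.take j).flatten.length) rest := by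
  intro rest
  induction rest with
  | nil => intro j _; rfl
  | cons p rest ih =>
      intro j hrest
      have hj : j < L.length := by
        by_contra hge
        rw [List.drop_eq_nil_of_le (by omega)] at hrest
        simp at hrest
      have hdrop := List.drop_eq_getElem_cons hj
      rw [hdrop] at hrest
      injection hrest with hp hrest'
      have hlen : (L.take (j + 1)).flatten.length = (L.take j).flatten.length + p.length := by
        rw [List.take_succ_eq_append_getElem hj, List.flatten_append, List.length_append, ← hp]
        simp
      have hhead :
          (((PySem.List.enumerate L 0).filter (fun jq => jq.1 != ((j : Int)))).map (·.2)).flatten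
            = L.flatten.take ((L.take j).flatten.length) ++
              L.flatten.drop ((L.take j).flatten.length + p.length) := by
        have h0 : (fun (jq : Int × List Int) => jq.1 != ((j : Int))) =
            (fun jq => jq.1 != (0 : Int) + (j : Int)) := by funext jq; norm_num
        rw [h0, pvEnumFilterNe L 0 j, pvEraseFlatten L j hj, ← hp]
      have hcast : ((j : Int) + 1) = (((j + 1 : Nat)) : Int) := by push_cast; ring
      rw [PySem.List.enumerate_cons]
      by_cases hm : fi ∈ p
      · simp only [List.filter_cons, decide_eq_true hm, if_true, List.flatMap_cons]
        rw [hcast, ih (j + 1) hrest', pvCore, if_pos hm, hhead, hlen]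
      · simp only [List.filter_cons, decide_eq_false hm, Bool.false_eq_true, if_false]
        rw [hcast, ih (j + 1) hrest', pvCore, if_neg hm, hlen]
        simp

-- ===== VERDICT (by name: the statement is the Claim_ definition above) =====
theorem getForbiddenFaceList_spec : Claim_equal_getForbiddenFaceList := by
  intro lfl epl vi fi _ hpre
  obtain ⟨h1, h2⟩ := hpre
  unfold Spec_getForbiddenFaceList getForbiddenFaceList getForbiddenFaceList_alt
  obtain ⟨L, hL⟩ : ∃ L, PySem.List.pyGet? lfl vi = some L := by
    cases hget : PySem.List.pyGet? lfl vi with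
    | none => exact absurd ((PySem.List.pyGet?_eq_none_iff _ _).mp hget) (by simpa using h1)
    | some L => exact ⟨L, rfl⟩
  obtain ⟨E, hE⟩ : ∃ E, PySem.List.pyGet? epl vi = some E := by
    cases hget : PySem.List.pyGet? epl vi with
    | none => exact absurd ((PySem.List.pyGet?_eq_none_iff _ _).mp hget) (by simpa using h2)
    | some E => exact ⟨E, rfl⟩
  rw [hL, hE]
  simp only
  rw [PySem.List.foldl_ite_eq_foldl_filter (p := fun ip : Int × List Int => fi ∈ ip.2),
    PySem.List.foldl_append_eq_flatMap, List.nil_append, pvFlattenFlatMap]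
  have hmain := pvA_main fi L L 0 rfl
  simp only [Nat.cast_zero, List.take_zero, List.flatten_nil, List.length_nil] at hmain
  rw [hmain, List.flatMap_id', pvB_loop fi L.flatten L [] 0]
  simp
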